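-- pv_equiv track=rewrite | github.com/seovalue/Algorithm | 소스코드/python_code/윈터코딩_1번.py | solution
-- ===== SOURCE A (Python) =====
-- def solution(n, delivery):
--     answer = [-1 for i in range(0, n+1)] #재고를 나타내는 배열, 재고가 있으면 1, 없으면 0, 모르면 -1
--     delivery = sorted(delivery, key=lambda x: -x[2])
--     for d in delivery:
--         g1, g2, delivered = d #g1: 굿즈1, g2: 굿즈2, delivered : 배송 여부
--         if delivered == 1: #배송된 경우
--             answer[g1] = answer[g2] = 1 #두 상품 모두 재고가 있다고 표시한다.
--         elif delivered == 0:
--             # 하나는 재고가 있고, 하나는 아직 모르는 경우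
--             if answer[g1] == 1 and answer[g2] == -1:
--                 answer[g2] = 0
--             if answer[g2] == 1 and answer[g1] == -1:
--                 answer[g1] = 0
--
--             # 하나가 없고, 하나는 아직 모르는 경우 -> 그대로 유지
--             # 둘다 모르는 경우 -> 그대로 유지
--
--     answer = [str(i) for i in answer[1:]]
--     answer = ''.join(answer).replace('-1','?').replace('0','X').replace('1','O')
--
--     return answer
-- ===== SOURCE B (Python) =====
-- def solution(n, delivery):
--     ones = set()
--     for g1, g2, d in delivery:
--         if d == 1:
--             ones.add(g1)
--             ones.add(g2)
--     zeros = set()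
--     for g1, g2, d in delivery:
--         if d == 0:
--             if g1 in ones and g2 not in ones:
--                 zeros.add(g2)
--             if g2 in ones and g1 not in ones:
--                 zeros.add(g1)
--     return ''.join('O' if i in ones else 'X' if i in zeros else '?' for i in range(1, n + 1))
-- ===== Notes on version B (the rewrite author's own statement) =====
-- stated objective: faster
-- what changed: B drops the sort and the mutable status array: one pass collects the set of goods covered by delivered==1 records, a second pass collects the set of goods inferred out-of-stock from delivered==0 records, and the answer string is built directly per good; this is equivalent because delivered==1 updates commute and all precede every delivered==0 check in A's sorted order.
-- outside the precondition, e.g. on solution(1, [(-1, 0, 1)]): A returns 'O', B returns '?'; on solution(1, [(5, 0, 1)]): A raises IndexError, B returns '?'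
import Mathlib
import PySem

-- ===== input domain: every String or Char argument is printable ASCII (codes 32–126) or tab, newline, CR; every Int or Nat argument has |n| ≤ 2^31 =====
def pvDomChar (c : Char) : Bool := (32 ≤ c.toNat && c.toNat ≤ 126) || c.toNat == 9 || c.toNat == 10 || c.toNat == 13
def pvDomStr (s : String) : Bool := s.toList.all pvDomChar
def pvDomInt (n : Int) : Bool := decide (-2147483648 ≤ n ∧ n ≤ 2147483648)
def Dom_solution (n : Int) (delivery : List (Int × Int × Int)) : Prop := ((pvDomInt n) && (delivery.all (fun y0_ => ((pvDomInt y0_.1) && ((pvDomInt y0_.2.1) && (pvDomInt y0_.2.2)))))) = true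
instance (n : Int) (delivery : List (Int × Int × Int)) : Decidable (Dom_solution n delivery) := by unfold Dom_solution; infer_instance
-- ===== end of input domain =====

-- B replaces A's sort-then-stateful-array pass with two set-building passes (delivered goods first,
-- then goods inferred out of stock) and builds the result string directly; return values agree on Pre_solution.

-- ===== PORT A =====
-- loop body of A's single pass over the sorted records
def stepA (ans : List Int) (r : Int × Int × Int) : List Int :=
  if r.2.2 = 1 then
    PySem.List.pySetD (PySem.List.pySetD ans r.1 1) r.2.1 1
  else if r.2.2 = 0 then
    let ans1 := if PySem.List.pyGetD ans r.1 0 = 1 ∧ PySem.List.pyGetD ans r.2.1 0 = -1 then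
        PySem.List.pySetD ans r.2.1 0 else ans
    if PySem.List.pyGetD ans1 r.2.1 0 = 1 ∧ PySem.List.pyGetD ans1 r.1 0 = -1 then
      PySem.List.pySetD ans1 r.1 0 else ans1
  else ans

def solution (n : Int) (delivery : List (Int × Int × Int)) : String :=
  let answer : List Int := (PySem.List.pyRange 0 (n+1) 1).map (fun _ => -1)
  let delivery2 := PySem.List.sorted delivery (fun x => -x.2.2) false
  let answer := delivery2.foldl stepA answer
  let strs := (PySem.List.slice answer (some 1) none).map PySem.Int.toStr
  PySem.Str.replace (PySem.Str.replace (PySem.Str.replace (PySem.Str.join "" strs) "-1" "?") "0" "X") "1" "O"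

-- ===== PORT B =====
-- loop body of B's first pass: collect goods known to be in stock
def onesStep (s : PySem.Set Int) (r : Int × Int × Int) : PySem.Set Int :=
  if r.2.2 = 1 then PySem.Set.add (PySem.Set.add s r.1) r.2.1 else s

-- loop body of B's second pass: collect goods inferred out of stock
def zerosStep (ones : PySem.Set Int) (s : PySem.Set Int) (r : Int × Int × Int) : PySem.Set Int :=
  if r.2.2 = 0 then
    let s1 := if PySem.Set.contains ones r.1 && !PySem.Set.contains ones r.2.1 then
        PySem.Set.add s r.2.1 else s
    if PySem.Set.contains ones r.2.1 && !PySem.Set.contains ones r.1 then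
      PySem.Set.add s1 r.1 else s1
  else s

def solution_alt (n : Int) (delivery : List (Int × Int × Int)) : String :=
  let ones := delivery.foldl onesStep PySem.Set.empty
  let zeros := delivery.foldl (zerosStep ones) PySem.Set.empty
  PySem.Str.join "" ((PySem.List.pyRange 1 (n+1) 1).map (fun i =>
    if PySem.Set.contains ones i then "O" else if PySem.Set.contains zeros i then "X" else "?"))

-- ===== PRECONDITION & SPEC =====
-- Pre_ restricts to the problem's natural domain: goods numbers of delivered/undelivered records lie in [0, n]
-- (records with any other delivered-flag are ignored by both programs and stay unconstrained). Outside it A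
-- raises IndexError, or — for negative goods numbers — silently aliases cells through Python's negative-index
-- wraparound, an artefact of A's list indexing on inputs outside the task's natural domain.
def Pre_solution (n : Int) (delivery : List (Int × Int × Int)) : Prop :=
  ∀ r ∈ delivery, (r.2.2 = 0 ∨ r.2.2 = 1) → 0 ≤ r.1 ∧ r.1 ≤ n ∧ 0 ≤ r.2.1 ∧ r.2.1 ≤ n
instance (n : Int) (delivery : List (Int × Int × Int)) : Decidable (Pre_solution n delivery) := by
  unfold Pre_solution; infer_instance

def pvWitness_solution : Int × (List (Int × Int × Int)) := (3, [(1, 2, 1), (2, 3, 0)])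

def Spec_solution (n : Int) (delivery : List (Int × Int × Int)) (out : String) : Prop := out = solution_alt n delivery
instance (n : Int) (delivery : List (Int × Int × Int)) (out : String) : Decidable (Spec_solution n delivery out) := by unfold Spec_solution; infer_instance

-- ===== CLAIM (what is proved, stated in full; the proofs are below) =====
def Claim_equal_solution : Prop := ∀ (n : Int) (delivery : List (Int × Int × Int)), Dom_solution n delivery → Pre_solution n delivery → Spec_solution n delivery (solution n delivery)

-- ===== LEMMAS AND PROOFS =====

-- the common pointwise description: which goods end up marked in stock (1) / out of stock (0) / unknown (-1)
def onesB (dl : List (Int × Int × Int)) (j : Int) : Bool :=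
  dl.any (fun r => r.2.2 == 1 && (r.1 == j || r.2.1 == j))
def zB (dl : List (Int × Int × Int)) (j : Int) : Bool :=
  dl.any (fun r => r.2.2 == 0 && ((r.1 == j && onesB dl r.2.1) || (r.2.1 == j && onesB dl r.1)))
def valA (dl : List (Int × Int × Int)) (j : Int) : Int :=
  if onesB dl j then 1 else if zB dl j then 0 else -1
def charOf (v : Int) : Char := if v = 1 then 'O' else if v = 0 then 'X' else '?'
-- the characters each cell value contributes to the joined string
def enc (v : Int) : List Char := if v = -1 then ['-', '1'] else if v = 0 then ['0'] else ['1']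

lemma length_stepA (a : List Int) (r : Int × Int × Int) : (stepA a r).length = a.length := by
  unfold stepA; split_ifs <;> simp [apply_ite List.length, PySem.List.length_pySetD]

lemma length_foldl_stepA (M : List (Int × Int × Int)) (a : List Int) :
    (M.foldl stepA a).length = a.length := by
  induction M generalizing a with
  | nil => rfl
  | cons r M ih => simp only [List.foldl_cons]; rw [ih, length_stepA]

lemma getD_setD (a : List Int) (g j v d : Int) (h0 : 0 ≤ g) (h1 : g < a.length) (hj : 0 ≤ j) :
    PySem.List.pyGetD (PySem.List.pySetD a g v) j d = if j = g then v else PySem.List.pyGetD a j d := by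
  rw [PySem.List.pySetD_of_nonneg a v h0, PySem.List.pyGetD_of_nonneg _ d hj, PySem.List.pyGetD_of_nonneg _ d hj]
  by_cases hjg : j = g
  · subst hjg
    rw [if_pos rfl]
    have : j.toNat < a.length := by omega
    simp [List.getD_eq_getElem?_getD, this]
  · rw [if_neg hjg]
    have : g.toNat ≠ j.toNat := by omega
    simp [List.getD_eq_getElem?_getD, this]

lemma foldl_stepA_filter (M : List (Int × Int × Int)) (a : List Int) :
    M.foldl stepA a = (M.filter (fun r => r.2.2 == 1 || r.2.2 == 0)).foldl stepA a := by
  induction M generalizing a with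
  | nil => rfl
  | cons r M ih =>
    by_cases h1 : r.2.2 = 1
    · simp [h1, List.foldl_cons, ih]
    · by_cases h0 : r.2.2 = 0
      · simp [h0, List.foldl_cons, ih]
      · have : stepA a r = a := by unfold stepA; simp [h1, h0]
        simp [h1, h0, List.foldl_cons, this, ih]

lemma desc_split (M : List (Int × Int × Int))
    (hm : ∀ r ∈ M, r.2.2 = 1 ∨ r.2.2 = 0)
    (hp : M.Pairwise (fun a b => b.2.2 ≤ a.2.2)) :
    M = M.filter (fun r => r.2.2 == 1) ++ M.filter (fun r => r.2.2 == 0) := by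
  induction M with
  | nil => rfl
  | cons r M ih =>
    rcases List.pairwise_cons.mp hp with ⟨hr, hp'⟩
    rcases hm r (by simp) with h1 | h0
    · have := ih (fun x hx => hm x (by simp [hx])) hp'
      simp [h1]
      exact this
    · have hall : ∀ x ∈ M, x.2.2 = 0 := by
        intro x hx
        rcases hm x (by simp [hx]) with hx1 | hx0
        · have := hr x hx; omega
        · exact hx0
      have f1 : M.filter (fun r => r.2.2 == 1) = [] := by
        rw [List.filter_eq_nil_iff]
        intro x hx; simp [hall x hx]
      have f0 : M.filter (fun r => r.2.2 == 0) = M := by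
        rw [List.filter_eq_self]
        intro x hx; simp [hall x hx]
      have f1' : (r :: M).filter (fun r => r.2.2 == 1) = [] := by
        simp [h0, f1]
      simp [h0, f1, f0]

lemma ones_pass (M : List (Int × Int × Int)) :
    ∀ (a : List Int),
    (∀ r ∈ M, r.2.2 = 1 ∧ 0 ≤ r.1 ∧ r.1 < a.length ∧ 0 ≤ r.2.1 ∧ r.2.1 < a.length) →
    ∀ (j : Int), 0 ≤ j →
    PySem.List.pyGetD (M.foldl stepA a) j 0
      = if M.any (fun r => r.1 == j || r.2.1 == j) then 1 else PySem.List.pyGetD a j 0 := by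
  induction M with
  | nil => intro a _ j _; simp
  | cons r M ih =>
    intro a h j hj
    obtain ⟨hd, h11, h12, h21, h22⟩ := h r (by simp)
    have hstep : stepA a r = PySem.List.pySetD (PySem.List.pySetD a r.1 1) r.2.1 1 := by
      unfold stepA; rw [if_pos hd]
    have hlen : ((PySem.List.pySetD a r.1 1).length : Int) = a.length := by
      simp [PySem.List.length_pySetD]
    have ha' : ∀ x ∈ M, x.2.2 = 1 ∧ 0 ≤ x.1 ∧ x.1 < (stepA a r).length ∧ 0 ≤ x.2.1 ∧ x.2.1 < (stepA a r).length := by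
      intro x hx
      have := h x (by simp [hx])
      rwa [length_stepA]
    rw [List.foldl_cons, ih (stepA a r) ha' j hj, hstep]
    rw [getD_setD _ _ _ _ _ h21 (by rw [hlen]; exact h22) hj,
        getD_setD _ _ _ _ _ h11 h12 hj]
    simp only [List.any_cons]
    by_cases hM : M.any (fun r => r.1 == j || r.2.1 == j) = true
    · simp [hM]
    · simp only [hM, Bool.or_false]
      by_cases e2 : j = r.2.1
      · simp [e2]
      · by_cases e1 : j = r.1
        · simp [e1]
        · have : ¬ (r.1 == j || r.2.1 == j) = true := by
            simp; constructor <;> omega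
          simp [e1, e2, this]

lemma zeros_pass (M : List (Int × Int × Int)) (w : Int → Bool) :
    ∀ (zacc : Int → Bool) (a : List Int),
    (∀ r ∈ M, r.2.2 = 0 ∧ 0 ≤ r.1 ∧ r.1 < a.length ∧ 0 ≤ r.2.1 ∧ r.2.1 < a.length) →
    (∀ j : Int, 0 ≤ j → PySem.List.pyGetD a j 0 = if j < a.length then (if w j then 1 else if zacc j then 0 else -1) else 0) →
    ∀ j : Int, 0 ≤ j →
    PySem.List.pyGetD (M.foldl stepA a) j 0
      = if j < a.length then
          (if w j then 1
           else if zacc j || M.any (fun r => (r.1 == j && w r.2.1) || (r.2.1 == j && w r.1)) then 0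
           else -1)
        else 0 := by
  induction M with
  | nil =>
    intro zacc a _ hinv j hj
    simpa using hinv j hj
  | cons r M ih =>
    intro zacc a hM hinv j hj
    obtain ⟨hd, h11, h12, h21, h22⟩ := hM r (by simp)
    set g1 := r.1 with hg1
    set g2 := r.2.1 with hg2
    -- invariant for the updated array, with the extended zero-set
    set zacc' : Int → Bool := fun j => zacc j || ((g1 == j && w g2) || (g2 == j && w g1)) with hz'
    have hlen : (stepA a r).length = a.length := length_stepA a r
    have hinv' : ∀ j : Int, 0 ≤ j →
        PySem.List.pyGetD (stepA a r) j 0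
          = if j < (stepA a r).length then (if w j then 1 else if zacc' j then 0 else -1) else 0 := by
      intro i hi
      have v1 := hinv g1 h11
      have v2 := hinv g2 h21
      rw [if_pos h12] at v1
      rw [if_pos h22] at v2
      have hstep : stepA a r =
          (let ans1 := if PySem.List.pyGetD a g1 0 = 1 ∧ PySem.List.pyGetD a g2 0 = -1 then
              PySem.List.pySetD a g2 0 else a
           if PySem.List.pyGetD ans1 g2 0 = 1 ∧ PySem.List.pyGetD ans1 g1 0 = -1 then
             PySem.List.pySetD ans1 g1 0 else ans1) := by
        unfold stepA
        rw [if_neg (by omega), if_pos hd]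
      rw [hlen, hstep]
      simp only []
      by_cases c1 : PySem.List.pyGetD a g1 0 = 1 ∧ PySem.List.pyGetD a g2 0 = -1
      · -- first if fires: g2 := 0 ; here w g1, ¬w g2, ¬zacc g2
        have hw1 : w g1 = true := by by_contra hb; simp [hb] at v1; split_ifs at v1 <;> omega
        have hw2 : w g2 = false := by by_contra hb; simp at hb; simp [hb] at v2; omega
        have hz2 : zacc g2 = false := by by_contra hb; simp at hb; simp [hw2, hb] at v2; omega
        rw [if_pos c1]
        have e2 : PySem.List.pyGetD (PySem.List.pySetD a g2 0) g2 0 = 0 := by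
          rw [getD_setD _ _ _ _ _ h21 h22 h21]; simp
        -- second if cannot fire: value at g2 is 0 ≠ 1
        rw [if_neg (by rw [e2]; rintro ⟨h, -⟩; omega)]
        rw [getD_setD _ _ _ _ _ h21 h22 hi]
        by_cases ei2 : i = g2
        · subst ei2
          simp only [hz']
          simp [hw2, hz2, hw1, h22]
        · rw [if_neg ei2, hinv i hi]
          by_cases hil : i < (a.length : Int)
          · rw [if_pos hil, if_pos hil]
            by_cases hwi : w i
            · simp [hwi]
            · simp only [hwi, if_false, Bool.false_eq_true]
              have hzz : zacc' i = zacc i := by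
                simp [hz', hw2, show ¬ g2 = i from fun h => ei2 h.symm]
              rw [hzz]
          · rw [if_neg hil, if_neg hil]
      · rw [if_neg c1]
        by_cases c2 : PySem.List.pyGetD a g2 0 = 1 ∧ PySem.List.pyGetD a g1 0 = -1
        · -- second if fires: g1 := 0 ; here w g2, ¬w g1, ¬zacc g1
          have hw2 : w g2 = true := by by_contra hb; simp [hb] at v2; split_ifs at v2 <;> omega
          have hw1 : w g1 = false := by by_contra hb; simp at hb; simp [hb] at v1; omega
          have hz1 : zacc g1 = false := by by_contra hb; simp at hb; simp [hw1, hb] at v1; omega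
          rw [if_pos c2, getD_setD _ _ _ _ _ h11 h12 hi]
          by_cases ei1 : i = g1
          · subst ei1
            simp only [hz']
            simp [hw1, hz1, hw2, h12]
          · rw [if_neg ei1, hinv i hi]
            by_cases hil : i < (a.length : Int)
            · rw [if_pos hil, if_pos hil]
              by_cases hwi : w i
              · simp [hwi]
              · simp only [hwi, if_false, Bool.false_eq_true]
                have hzz : zacc' i = zacc i := by
                  simp [hz', hw1, show ¬ g1 = i from fun h => ei1 h.symm]
                rw [hzz]
            · rw [if_neg hil, if_neg hil]
        · -- nothing fires
          rw [if_neg c2, hinv i hi]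
          by_cases hil : i < (a.length : Int)
          · rw [if_pos hil, if_pos hil]
            by_cases hwi : w i
            · simp [hwi]
            · simp only [hwi, if_false, Bool.false_eq_true]
              -- neither condition can hold for i : show zacc' i = zacc i
              have : zacc' i = zacc i := by
                simp only [hz']
                -- if g1 = i and w g2 : then pyGetD a g1 = -1 or 0; c2 failed means ¬(w g2 ∧ ...)
                by_cases e1 : g1 = i
                · subst e1
                  by_cases e2 : g2 = g1
                  · -- g1 = g2 = i, w i false: both conjuncts have w _ = false
                    rw [e2]
                    simp [hwi]
                  · -- c2 : ¬(a[g2]=1 ∧ a[g1]=-1); a[g1] = if zacc then 0 else -1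
                    by_cases hzi : zacc g1
                    · simp [hzi]
                    · -- a[g1] = -1 so c2 gives a[g2] ≠ 1 so ¬ w g2
                      have : PySem.List.pyGetD a g2 0 ≠ 1 := by
                        intro hb; exact c2 ⟨hb, by rw [v1]; simp [hwi, hzi]⟩
                      have hw2 : w g2 = false := by
                        by_contra hb; simp at hb; rw [v2, if_pos hb] at this; omega
                      simp [hw2, hwi, hzi]
                · by_cases e2 : g2 = i
                  · subst e2
                    by_cases hzi : zacc g2
                    · simp [hzi]
                    · have : PySem.List.pyGetD a g1 0 ≠ 1 := by
                        intro hb; exact c1 ⟨hb, by rw [v2]; simp [hwi, hzi]⟩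
                      have hw1 : w g1 = false := by
                        by_contra hb; simp at hb; rw [v1, if_pos hb] at this; omega
                      simp [hw1, hwi, hzi]
                  · simp [e1, e2]
              rw [this]
          · rw [if_neg hil, if_neg hil]
    have hM' : ∀ x ∈ M, x.2.2 = 0 ∧ 0 ≤ x.1 ∧ x.1 < (stepA a r).length ∧ 0 ≤ x.2.1 ∧ x.2.1 < (stepA a r).length := by
      intro x hx
      have := hM x (by simp [hx])
      rwa [hlen]
    rw [List.foldl_cons, ih zacc' (stepA a r) hM' hinv' j hj, hlen]
    by_cases hjl : j < (a.length : Int)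
    · rw [if_pos hjl, if_pos hjl]
      by_cases hwj : w j
      · simp [hwj]
      · simp only [hwj, Bool.false_eq_true, if_false, List.any_cons]
        congr 1
        simp only [hz']
        cases zacc j <;> cases (g1 == j && w g2) <;> cases (g2 == j && w g1) <;>
          simp [Bool.or_comm]
    · rw [if_neg hjl, if_neg hjl]

lemma go_single (a b : Char) : ∀ (fuel : Nat) (l acc : List Char), l.length ≤ fuel →
    PySem.Chars.replace.go [a] [b] fuel l acc
      = acc.reverse ++ l.map (fun c => if c = a then b else c) := by
  intro fuel
  induction fuel with
  | zero =>
    intro l acc h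
    have : l = [] := by cases l <;> simp_all
    subst this
    simp [PySem.Chars.replace.go]
  | succ fuel ih =>
    intro l acc h
    cases l with
    | nil => simp [PySem.Chars.replace.go]
    | cons c t =>
      rw [PySem.Chars.replace.go]
      by_cases hc : c = a
      · subst hc
        rw [if_pos (by simp [List.isPrefixOf])]
        simp only [List.length_cons] at h
        rw [ih _ _ (by simpa using h)]
        simp
      · rw [if_neg (by simp [List.isPrefixOf, Ne.symm hc])]
        rw [ih _ _ (by simpa using h)]
        simp [hc]

lemma replace_single (cs : List Char) (a b : Char) :
    PySem.Chars.replace cs [a] [b] = cs.map (fun c => if c = a then b else c) := by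
  rw [PySem.Chars.replace]
  rw [if_neg (by simp)]
  simpa using go_single a b cs.length cs [] le_rfl

lemma go_minus_one : ∀ (vs : List Int) (fuel : Nat) (acc : List Char),
    (∀ v ∈ vs, v = -1 ∨ v = 0 ∨ v = 1) → (vs.map enc).flatten.length ≤ fuel →
    PySem.Chars.replace.go ['-', '1'] ['?'] fuel (vs.map enc).flatten acc
      = acc.reverse ++ vs.map (fun v => if v = -1 then '?' else if v = 0 then '0' else '1') := by
  intro vs
  induction vs with
  | nil =>
    intro fuel acc _ _
    cases fuel <;> simp [PySem.Chars.replace.go]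
  | cons v vs ih =>
    intro fuel acc hv hf
    have hv' : ∀ x ∈ vs, x = -1 ∨ x = 0 ∨ x = 1 := fun x hx => hv x (List.mem_cons_of_mem _ hx)
    rcases hv v (by simp) with h | h | h
    · subst h
      have hl : (((-1 : Int) :: vs).map enc).flatten = '-' :: '1' :: (vs.map enc).flatten := by
        simp [enc]
      rw [hl] at hf ⊢
      simp only [List.length_cons] at hf
      obtain ⟨f', rfl⟩ : ∃ f', fuel = f' + 1 := ⟨fuel - 1, by omega⟩
      rw [PySem.Chars.replace.go, if_pos (by simp [List.isPrefixOf])]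
      have hdrop : List.drop (['-', '1'] : List Char).length ('-' :: '1' :: (vs.map enc).flatten)
          = (vs.map enc).flatten := by simp
      rw [hdrop, ih f' _ hv' (by omega)]
      simp
    · subst h
      have hl : (((0 : Int) :: vs).map enc).flatten = '0' :: (vs.map enc).flatten := by
        simp [enc]
      rw [hl] at hf ⊢
      simp only [List.length_cons] at hf
      obtain ⟨f', rfl⟩ : ∃ f', fuel = f' + 1 := ⟨fuel - 1, by omega⟩
      rw [PySem.Chars.replace.go, if_neg (by simp [List.isPrefixOf])]
      rw [ih f' _ hv' (by omega)]
      simp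
    · subst h
      have hl : (((1 : Int) :: vs).map enc).flatten = '1' :: (vs.map enc).flatten := by
        simp [enc]
      rw [hl] at hf ⊢
      simp only [List.length_cons] at hf
      obtain ⟨f', rfl⟩ : ∃ f', fuel = f' + 1 := ⟨fuel - 1, by omega⟩
      rw [PySem.Chars.replace.go, if_neg (by simp [List.isPrefixOf])]
      rw [ih f' _ hv' (by omega)]
      simp

lemma replace_minus_one (vs : List Int) (h : ∀ v ∈ vs, v = -1 ∨ v = 0 ∨ v = 1) :
    PySem.Chars.replace (vs.map enc).flatten ['-', '1'] ['?']
      = vs.map (fun v => if v = -1 then '?' else if v = 0 then '0' else '1') := by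
  rw [PySem.Chars.replace, if_neg (by simp)]
  simpa using go_minus_one vs (vs.map enc).flatten.length [] h le_rfl

lemma intercalate_nil_char (xss : List (List Char)) : ([] : List Char).intercalate xss = xss.flatten := by
  induction xss with
  | nil => rfl
  | cons x xss ih =>
    cases xss with
    | nil => simp [List.intercalate]
    | cons y yss =>
      simp [List.intercalate, List.intersperse] at ih ⊢
      exact ih

lemma render (vs : List Int) (h : ∀ v ∈ vs, v = -1 ∨ v = 0 ∨ v = 1) :
    PySem.Str.replace (PySem.Str.replace (PySem.Str.replace
      (PySem.Str.join "" (vs.map PySem.Int.toStr)) "-1" "?") "0" "X") "1" "O"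
      = String.ofList (vs.map charOf) := by
  apply String.toList_inj.mp
  rw [PySem.Str.toList_replace, PySem.Str.toList_replace, PySem.Str.toList_replace,
      PySem.Str.toList_join]
  have h1 : (vs.map PySem.Int.toStr).map String.toList = vs.map enc := by
    rw [List.map_map]
    apply List.map_congr_left
    intro v hv
    rcases h v hv with rfl | rfl | rfl <;> decide
  have h2 : PySem.Chars.join "".toList (List.map String.toList (vs.map PySem.Int.toStr))
      = (vs.map enc).flatten := by
    rw [h1]
    show PySem.Chars.join [] _ = _
    rw [PySem.Chars.join, intercalate_nil_char]
  rw [h2]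
  have e1 : ("-1" : String).toList = ['-', '1'] := by decide
  have e2 : ("?" : String).toList = ['?'] := by decide
  rw [e1, e2, replace_minus_one vs h]
  have e3 : ("0" : String).toList = ['0'] := by decide
  have e4 : ("X" : String).toList = ['X'] := by decide
  have e5 : ("1" : String).toList = ['1'] := by decide
  have e6 : ("O" : String).toList = ['O'] := by decide
  rw [e3, e4, replace_single, e5, e6, replace_single]
  simp only [List.map_map, String.toList_ofList]
  apply List.map_congr_left
  intro v hv
  rcases h v hv with rfl | rfl | rfl <;> simp [charOf]

lemma ones_mem (dl : List (Int × Int × Int)) (j : Int) :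
    ∀ (s : PySem.Set Int), j ∈ dl.foldl onesStep s ↔ (j ∈ s ∨ onesB dl j = true) := by
  induction dl with
  | nil => intro s; simp [onesB]
  | cons r dl ih =>
    intro s
    rw [List.foldl_cons, ih]
    unfold onesB
    simp only [List.any_cons, Bool.or_eq_true, Bool.and_eq_true, Bool.or_eq_true, beq_iff_eq]
    unfold onesStep
    by_cases h1 : r.2.2 = 1
    · rw [if_pos h1]
      rw [PySem.Set.mem_add, PySem.Set.mem_add]
      simp only [h1, true_and]
      constructor
      · rintro (((hs | e) | e) | h)
        · tauto
        · subst e; tauto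
        · subst e; tauto
        · tauto
      · rintro (hs | ((e | e) | h))
        · tauto
        · subst e; tauto
        · subst e; tauto
        · tauto
    · rw [if_neg h1]
      simp [h1]

lemma zeros_mem (O : PySem.Set Int) (dl : List (Int × Int × Int)) (j : Int) :
    ∀ (s : PySem.Set Int), j ∈ dl.foldl (zerosStep O) s ↔
      (j ∈ s ∨ dl.any (fun r => r.2.2 == 0 &&
        ((r.2.1 == j && (PySem.Set.contains O r.1 && !PySem.Set.contains O r.2.1)) ||
         (r.1 == j && (PySem.Set.contains O r.2.1 && !PySem.Set.contains O r.1)))) = true) := by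
  induction dl with
  | nil => intro s; simp
  | cons r dl ih =>
    intro s
    rw [List.foldl_cons, ih]
    simp only [List.any_cons, Bool.or_eq_true, Bool.and_eq_true, beq_iff_eq]
    unfold zerosStep
    by_cases h0 : r.2.2 = 0
    · rw [if_pos h0]
      cases hc1 : (PySem.Set.contains O r.1 && !PySem.Set.contains O r.2.1) with
      | true =>
        cases hc2 : (PySem.Set.contains O r.2.1 && !PySem.Set.contains O r.1) with
        | true => simp at hc1 hc2; simp_all
        | false =>
          simp [h0, PySem.Set.mem_add]
          aesop
      | false =>
        cases hc2 : (PySem.Set.contains O r.2.1 && !PySem.Set.contains O r.1) with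
        | true =>
          simp [h0, PySem.Set.mem_add]
          aesop
        | false =>
          simp [h0]
          aesop
    · rw [if_neg h0]
      simp [h0]

lemma init_getD (n j : Int) (hj : 0 ≤ j) :
    PySem.List.pyGetD ((PySem.List.pyRange 0 (n+1) 1).map (fun _ => (-1 : Int))) j 0
      = if j < n+1 then -1 else 0 := by
  rw [PySem.List.pyGetD_of_nonneg _ _ hj]
  rw [List.getD_eq_getElem?_getD, List.getElem?_map]
  have hl : (PySem.List.pyRange 0 (n+1) 1).length = (n+1).toNat := by
    simp
  by_cases h : j < n + 1
  · have hlt : j.toNat < (PySem.List.pyRange 0 (n+1) 1).length := by rw [hl]; omega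
    rw [List.getElem?_eq_getElem hlt]
    simp [h]
  · have hge : (PySem.List.pyRange 0 (n+1) 1).length ≤ j.toNat := by rw [hl]; omega
    rw [List.getElem?_eq_none hge]
    simp [h]

lemma onesB_le (n : Int) (dl : List (Int × Int × Int)) (hPre : Pre_solution n dl) (j : Int)
    (h : onesB dl j = true) : 0 ≤ j ∧ j ≤ n := by
  rcases List.any_eq_true.mp h with ⟨r, hr, hp⟩
  simp only [Bool.and_eq_true, Bool.or_eq_true, beq_iff_eq] at hp
  have := hPre r hr (Or.inr hp.1)
  rcases hp.2 with e | e <;> omega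

lemma A_array (n : Int) (dl : List (Int × Int × Int)) (hPre : Pre_solution n dl) (j : Int) (hj : 0 ≤ j) :
    PySem.List.pyGetD
      ((PySem.List.sorted dl (fun x => -x.2.2) false).foldl stepA
        ((PySem.List.pyRange 0 (n+1) 1).map (fun _ => (-1 : Int)))) j 0
      = if j ≤ n then valA dl j else 0 := by
  have hb := hPre
  set init : List Int := (PySem.List.pyRange 0 (n+1) 1).map (fun _ => (-1 : Int)) with hinit
  set S := PySem.List.sorted dl (fun x : Int × Int × Int => -x.2.2) false with hS
  have hlinit : init.length = (n + 1).toNat := by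
    rw [hinit]
    simp
  -- restrict to processed records
  rw [foldl_stepA_filter]
  set M := S.filter (fun r => r.2.2 == 1 || r.2.2 == 0) with hM
  have hm : ∀ r ∈ M, r.2.2 = 1 ∨ r.2.2 = 0 := by
    intro r hr
    have := (List.mem_filter.mp hr).2
    simpa using this
  have hp : M.Pairwise (fun a b => b.2.2 ≤ a.2.2) := by
    apply List.Pairwise.filter
    have := PySem.List.sorted_pairwise dl (fun x : Int × Int × Int => -x.2.2)
    exact this.imp (by intro a b h; omega)
  have hsplit := desc_split M hm hp
  have hM1 : M.filter (fun r => r.2.2 == 1) = S.filter (fun r => r.2.2 == 1) := by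
    rw [hM, List.filter_filter]
    apply List.filter_congr
    intro r _
    by_cases h : r.2.2 = 1 <;> simp [h]
  have hM0 : M.filter (fun r => r.2.2 == 0) = S.filter (fun r => r.2.2 == 0) := by
    rw [hM, List.filter_filter]
    apply List.filter_congr
    intro r _
    by_cases h : r.2.2 = 0 <;> simp [h]
  set M1 := S.filter (fun r => r.2.2 == 1) with hM1d
  set M0 := S.filter (fun r => r.2.2 == 0) with hM0d
  rw [hsplit, hM1, hM0, List.foldl_append]
  have hmem1 : ∀ r, r ∈ M1 ↔ r ∈ dl ∧ r.2.2 = 1 := by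
    intro r
    rw [hM1d, List.mem_filter, PySem.List.mem_sorted]
    simp
  have hmem0 : ∀ r, r ∈ M0 ↔ r ∈ dl ∧ r.2.2 = 0 := by
    intro r
    rw [hM0d, List.mem_filter, PySem.List.mem_sorted]
    simp
  -- ones pass
  have hr1 : ∀ r ∈ M1, r.2.2 = 1 ∧ 0 ≤ r.1 ∧ r.1 < init.length ∧ 0 ≤ r.2.1 ∧ r.2.1 < init.length := by
    intro r hr
    obtain ⟨hrd, h1⟩ := (hmem1 r).mp hr
    have := hb r hrd (Or.inr h1)
    refine ⟨h1, by omega, by rw [hlinit]; omega, by omega, by rw [hlinit]; omega⟩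
  have hany1 : ∀ i : Int, M1.any (fun r => r.1 == i || r.2.1 == i) = onesB dl i := by
    intro i
    rw [Bool.eq_iff_iff, List.any_eq_true, onesB, List.any_eq_true]
    constructor
    · rintro ⟨r, hr, hpp⟩
      obtain ⟨hrd, h1⟩ := (hmem1 r).mp hr
      refine ⟨r, hrd, ?_⟩
      rw [Bool.and_eq_true]
      exact ⟨by simp [h1], hpp⟩
    · rintro ⟨r, hr, hpp⟩
      rw [Bool.and_eq_true] at hpp
      refine ⟨r, (hmem1 r).mpr ⟨hr, by simpa using hpp.1⟩, hpp.2⟩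
  set A1 := M1.foldl stepA init with hA1
  have hlA1 : A1.length = init.length := length_foldl_stepA M1 init
  have hinv : ∀ i : Int, 0 ≤ i →
      PySem.List.pyGetD A1 i 0
        = if i < A1.length then (if onesB dl i then 1 else if (fun _ : Int => false) i then 0 else -1) else 0 := by
    intro i hi
    rw [hA1, ones_pass M1 init hr1 i hi, hany1 i]
    by_cases ho : onesB dl i = true
    · have := onesB_le n dl hb i ho
      rw [if_pos ho, if_pos (by rw [hlA1, hlinit]; omega)]
      simp [ho]
    · simp only [ho, Bool.false_eq_true, if_false]
      rw [hinit, init_getD n i hi]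
      rw [if_congr (show (i < n + 1) ↔ (i < (A1.length : Int)) by rw [hlA1, hlinit]; omega) rfl rfl]
  have hr0 : ∀ r ∈ M0, r.2.2 = 0 ∧ 0 ≤ r.1 ∧ r.1 < A1.length ∧ 0 ≤ r.2.1 ∧ r.2.1 < A1.length := by
    intro r hr
    obtain ⟨hrd, h0⟩ := (hmem0 r).mp hr
    have := hb r hrd (Or.inl h0)
    refine ⟨h0, by omega, by rw [hlA1, hlinit]; omega, by omega, by rw [hlA1, hlinit]; omega⟩
  have hany0 : ∀ i : Int,
      M0.any (fun r => (r.1 == i && onesB dl r.2.1) || (r.2.1 == i && onesB dl r.1)) = zB dl i := by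
    intro i
    rw [Bool.eq_iff_iff, List.any_eq_true, zB, List.any_eq_true]
    constructor
    · rintro ⟨r, hr, hpp⟩
      obtain ⟨hrd, h0⟩ := (hmem0 r).mp hr
      refine ⟨r, hrd, ?_⟩
      rw [Bool.and_eq_true]
      exact ⟨by simp [h0], hpp⟩
    · rintro ⟨r, hr, hpp⟩
      rw [Bool.and_eq_true] at hpp
      refine ⟨r, (hmem0 r).mpr ⟨hr, by simpa using hpp.1⟩, hpp.2⟩
  rw [zeros_pass M0 (onesB dl) (fun _ => false) A1 hr0 hinv j hj]
  rw [hany0 j]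
  rw [if_congr (show (j < (A1.length : Int)) ↔ (j ≤ n) by rw [hlA1, hlinit]; omega) rfl rfl]
  unfold valA
  simp

lemma B_ones (dl : List (Int × Int × Int)) (j : Int) :
    PySem.Set.contains (dl.foldl onesStep PySem.Set.empty) j = onesB dl j := by
  rw [Bool.eq_iff_iff, PySem.Set.contains_iff, ones_mem]
  simp [PySem.Set.empty]

lemma B_zeros (dl : List (Int × Int × Int)) (j : Int) (hj : onesB dl j = false) :
    PySem.Set.contains (dl.foldl (zerosStep (dl.foldl onesStep PySem.Set.empty)) PySem.Set.empty) j
      = zB dl j := by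
  rw [Bool.eq_iff_iff, PySem.Set.contains_iff, zeros_mem]
  unfold zB
  simp only [List.any_eq_true]
  constructor
  · rintro (hs | ⟨r, hr, hpp⟩)
    · simp [PySem.Set.empty] at hs
    · refine ⟨r, hr, ?_⟩
      simp only [B_ones, Bool.and_eq_true, Bool.or_eq_true, beq_iff_eq,
        Bool.not_eq_eq_eq_not, Bool.not_true] at hpp ⊢
      tauto
  · rintro ⟨r, hr, hpp⟩
    right
    refine ⟨r, hr, ?_⟩
    simp only [B_ones, Bool.and_eq_true, Bool.or_eq_true, beq_iff_eq,
      Bool.not_eq_eq_eq_not, Bool.not_true] at hpp ⊢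
    rcases hpp.2 with ⟨e, ho⟩ | ⟨e, ho⟩
    · subst e; tauto
    · subst e; tauto

lemma valA_cases (dl : List (Int × Int × Int)) (j : Int) :
    valA dl j = -1 ∨ valA dl j = 0 ∨ valA dl j = 1 := by
  unfold valA; split_ifs <;> simp

lemma A_chars (n : Int) (dl : List (Int × Int × Int)) (hPre : Pre_solution n dl) :
    solution n dl = String.ofList ((PySem.List.pyRange 1 (n+1) 1).map (fun i => charOf (valA dl i))) := by
  simp only [solution]
  set F := (PySem.List.sorted dl (fun x : Int × Int × Int => -x.2.2) false).foldl stepA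
      ((PySem.List.pyRange 0 (n+1) 1).map (fun _ => (-1 : Int))) with hF
  have hlF : F.length = (n + 1).toNat := by
    rw [hF, length_foldl_stepA]
    simp
  have hvs : PySem.List.slice F (some 1) none = (PySem.List.pyRange 1 (n+1) 1).map (fun i => valA dl i) := by
    rw [PySem.List.slice_from F (by omega : (0:Int) ≤ 1)]
    apply List.ext_getElem
    · simp [hlF, PySem.List.length_pyRange_one]
      omega
    · intro k h1 h2
      have hk : k + 1 < F.length := by simp at h1; omega
      rw [List.getElem_drop]
      simp only [Int.toNat_one]
      have e1 : F[1 + k] = PySem.List.pyGetD F ((1 + k : Nat) : Int) 0 := by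
        rw [PySem.List.pyGetD_of_nonneg _ _ (by positivity)]
        rw [Int.toNat_natCast]
        rw [List.getD_eq_getElem?_getD, List.getElem?_eq_getElem (by omega)]
        rfl
      rw [e1, A_array n dl hPre _ (by positivity)]
      have hkn : ((1 + k : Nat) : Int) ≤ n := by
        simp [hlF] at h1
        omega
      rw [if_pos hkn]
      rw [List.getElem_map]
      rw [PySem.List.getElem_pyRange_one]
      congr 1
  rw [hvs]
  rw [List.map_map]
  have := render ((PySem.List.pyRange 1 (n+1) 1).map (fun i => valA dl i))
    (by intro v hv; simp at hv; obtain ⟨i, -, rfl⟩ := hv; exact valA_cases dl i)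
  rw [List.map_map] at this
  rw [List.map_map] at this
  exact this

lemma B_chars (n : Int) (dl : List (Int × Int × Int)) :
    solution_alt n dl = String.ofList ((PySem.List.pyRange 1 (n+1) 1).map (fun i => charOf (valA dl i))) := by
  unfold solution_alt
  apply String.toList_inj.mp
  rw [PySem.Str.toList_join, String.toList_ofList]
  show PySem.Chars.join [] _ = _
  have hmap : List.map String.toList ((PySem.List.pyRange 1 (n+1) 1).map (fun i =>
      if PySem.Set.contains (dl.foldl onesStep PySem.Set.empty) i then "O"
      else if PySem.Set.contains (dl.foldl (zerosStep (dl.foldl onesStep PySem.Set.empty)) PySem.Set.empty) i then "X" else "?"))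
      = ((PySem.List.pyRange 1 (n+1) 1).map (fun i => charOf (valA dl i))).map (fun c => [c]) := by
    rw [List.map_map, List.map_map]
    apply List.map_congr_left
    intro i _
    simp only [Function.comp_apply]
    by_cases ho : onesB dl i = true
    · rw [B_ones, ho]
      have hv : valA dl i = 1 := by simp [valA, ho]
      simp only [if_true, hv]
      decide
    · have ho' : onesB dl i = false := by simpa using ho
      rw [B_ones, ho']
      by_cases hz : zB dl i = true
      · rw [B_zeros dl i ho', hz]
        have hv : valA dl i = 0 := by simp [valA, ho', hz]
        simp only [Bool.false_eq_true, if_false, if_true, hv]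
        decide
      · have hz' : zB dl i = false := by simpa using hz
        rw [B_zeros dl i ho', hz']
        have hv : valA dl i = -1 := by simp [valA, ho', hz']
        simp only [Bool.false_eq_true, if_false, hv]
        decide
  rw [hmap, PySem.Chars.join_nil_singletons, String.toList_ofList]

-- ===== VERDICT (by name: the statement is the Claim_ definition above) =====
theorem solution_spec : Claim_equal_solution := by
  intro n dl _ hPre
  unfold Spec_solution
  rw [A_chars n dl hPre, B_chars n dl]
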